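-- pv_equiv track=rewrite | github.com/gh1tsh/sber-talent-case-contest-2023-krinzhenery-team | solutions/src/solution5.py | build_word_dictionary
-- ===== SOURCE A (Python) =====
-- def build_word_dictionary(line):
--     words = line.split()
--     result = dict()
--     for word in words:
--         if len(word) >= 4:
--             old = result.get(word, 0)
--             result[word] = old + 1
--     return result
-- ===== SOURCE B (Python) =====
-- def build_word_dictionary(line):
--     long_words = [w for w in line.split() if len(w) >= 4]
--     return {w: long_words.count(w) for w in dict.fromkeys(long_words)}
-- ===== Notes on version B (the rewrite author's own statement) =====
-- stated objective: alternative
-- what changed: Replaces the running hash-accumulation loop (get then overwrite per word) with a filter-once / dedup-then-count-per-distinct-word strategy: first collect the long words, then map each first occurrence to its total count.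
import Mathlib
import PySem

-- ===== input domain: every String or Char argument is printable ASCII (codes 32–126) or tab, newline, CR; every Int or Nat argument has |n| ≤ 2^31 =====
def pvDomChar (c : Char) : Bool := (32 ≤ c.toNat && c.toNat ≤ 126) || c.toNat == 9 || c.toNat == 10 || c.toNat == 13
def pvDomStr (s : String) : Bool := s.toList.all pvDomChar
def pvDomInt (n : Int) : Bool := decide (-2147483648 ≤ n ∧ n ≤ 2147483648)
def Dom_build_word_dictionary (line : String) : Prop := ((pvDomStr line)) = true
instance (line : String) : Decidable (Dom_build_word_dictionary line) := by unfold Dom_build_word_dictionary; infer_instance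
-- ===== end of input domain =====

-- B replaces A's running hash-accumulation pass by filter-then-dedup-then-count-per-distinct-word (alternative decomposition, same result).
-- ===== PORT A =====
def build_word_dictionary (line : String) : List (String × Int) :=
  let words := PySem.Str.split₀ line
  let result : PySem.Dict String Int :=
    words.foldl (fun r word =>
      if 4 ≤ PySem.Str.len word then
        let old := r.getD word 0
        r.insert word (old + 1)
      else r) PySem.Dict.empty
  result.items

-- ===== PORT B =====
def build_word_dictionary_alt (line : String) : List (String × Int) :=
  let long_words := (PySem.Str.split₀ line).filter (fun w => 4 ≤ PySem.Str.len w)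
  (PySem.List.dedup long_words).map (fun w => (w, (long_words.count w : Int)))

-- ===== PRECONDITION & SPEC =====
def Spec_build_word_dictionary (line : String) (out : List (String × Int)) : Prop := out = build_word_dictionary_alt line
instance (line : String) (out : List (String × Int)) : Decidable (Spec_build_word_dictionary line out) := by unfold Spec_build_word_dictionary; infer_instance

-- ===== CLAIM (what is proved, stated in full; the proofs are below) =====
def Claim_equal_build_word_dictionary : Prop := ∀ (line : String), Dom_build_word_dictionary line → Spec_build_word_dictionary line (build_word_dictionary line)

-- ===== LEMMAS AND PROOFS =====

-- ===== VERDICT (by name: the statement is the Claim_ definition above) =====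
theorem build_word_dictionary_spec : Claim_equal_build_word_dictionary := by
  intro line _
  unfold Spec_build_word_dictionary build_word_dictionary build_word_dictionary_alt
  simp only []
  rw [PySem.List.foldl_ite_eq_foldl_filter,
      PySem.Dict.foldl_insert_getD_add_one_eq_counter,
      PySem.Dict.items_counter]
  simp [PySem.List.dedup_eq_ofList]
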